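-- pv_equiv track=rewrite | github.com/alters-mit/sticky_mitten_avatar | doc_gen.py | get_enum_values
-- ===== SOURCE A (Python) =====
-- from typing import List, Dict
--
-- def get_enum_values(lines: List[str], start_index: int) -> str:
--     """
--     Returns a list of enum values.
--
--     :param lines: The lines in the document.
--     :param start_index: The line of the class defintion.
--     """
--
--     enum_desc = "Enum values:\n"
--     began_class_desc = False
--     end_class_desc = False
--     for i in range(start_index + 1, len(lines)):
--         if "class " in lines[i]:
--             break
--         if lines[i] == "":
--             continue
--         if '"""' in lines[i]:
--             if not began_class_desc:
--                 began_class_desc = True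
--             else:
--                 end_class_desc = True
--             continue
--         if not end_class_desc:
--             continue
--         enum_desc += "\n- `" + lines[i].strip().split(" = ")[0] + "`"
--     return enum_desc
-- ===== SOURCE B (Python) =====
-- def get_enum_values(lines, start_index):
--     """
--     Returns a list of enum values.
--
--     :param lines: The lines in the document.
--     :param start_index: The line of the class defintion.
--     """
--
--     header = "Enum values:\n"
--     region = []
--     for j in range(start_index + 1, len(lines)):
--         if "class " in lines[j]:
--             break
--         region.append(lines[j])
--     quotes = [k for k, s in enumerate(region) if '"""' in s]
--     if len(quotes) < 2:
--         return header
--     names = [s.strip().split(" = ")[0]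
--              for s in region[quotes[1] + 1:]
--              if s != "" and '"""' not in s]
--     return header + "".join("\n- `" + n + "`" for n in names)
-- ===== Notes on version B (the rewrite author's own statement) =====
-- stated objective: alternative
-- what changed: Replaces A's single-pass two-flag state machine with a pipeline: truncate the scan region at the next 'class ' line, locate the docstring delimiters by enumerate+filter, and build the result with one comprehension over the slice after the second delimiter.
import Mathlib
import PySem

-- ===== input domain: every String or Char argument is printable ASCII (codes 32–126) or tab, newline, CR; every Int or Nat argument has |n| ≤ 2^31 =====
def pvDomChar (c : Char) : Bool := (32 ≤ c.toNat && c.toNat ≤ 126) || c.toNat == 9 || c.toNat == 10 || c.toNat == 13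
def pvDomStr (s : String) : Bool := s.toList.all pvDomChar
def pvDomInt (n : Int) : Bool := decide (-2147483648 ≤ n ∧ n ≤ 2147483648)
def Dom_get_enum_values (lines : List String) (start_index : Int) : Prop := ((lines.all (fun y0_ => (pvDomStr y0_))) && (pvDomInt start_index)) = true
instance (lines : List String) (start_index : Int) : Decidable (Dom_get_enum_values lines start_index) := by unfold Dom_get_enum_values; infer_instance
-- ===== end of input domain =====

-- B replaces A's flag-toggling single scan by a truncate / find-second-delimiter / comprehension pipeline (objective: alternative, same cost).

-- lines[i].strip().split(" = ")[0]  (the same sub-expression occurs verbatim in A and in B)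
def pvName (s : String) : String :=
  ((PySem.Str.split? (PySem.Str.strip s) " = ").getD []).headD ""

-- ===== PORT A =====
-- the for-loop with break/continue, state (enum_desc, began_class_desc, end_class_desc)
def pvLoopA (lines : List String) : List Int → String → Bool → Bool → String
  | [], acc, _, _ => acc
  | i :: rest, acc, began, ended =>
    match PySem.List.pyGet? lines i with
    | none => acc  -- IndexError in Python; excluded by Pre_
    | some s =>
      if PySem.Str.isIn "class " s then acc
      else if s = "" then pvLoopA lines rest acc began ended
      else if PySem.Str.isIn "\"\"\"" s then
        if began = false then pvLoopA lines rest acc true ended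
        else pvLoopA lines rest acc began true
      else if ended = false then pvLoopA lines rest acc began ended
      else pvLoopA lines rest (acc ++ ("\n- `" ++ pvName s ++ "`")) began ended

def get_enum_values (lines : List String) (start_index : Int) : String :=
  pvLoopA lines (PySem.List.pyRange (start_index + 1) (lines.length : Int)) "Enum values:\n" false false

-- ===== PORT B =====
-- B's first loop: collect lines[j] until a 'class ' line (break) or the range ends
def pvRegionB (lines : List String) : List Int → List String
  | [] => []
  | j :: rest =>
    match PySem.List.pyGet? lines j with
    | none => []  -- IndexError in Python; excluded by Pre_
    | some s => if PySem.Str.isIn "class " s then [] else s :: pvRegionB lines rest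

def get_enum_values_alt (lines : List String) (start_index : Int) : String :=
  let region := pvRegionB lines (PySem.List.pyRange (start_index + 1) (lines.length : Int))
  let quotes := ((PySem.List.enumerate region).filter
      (fun p => PySem.Str.isIn "\"\"\"" p.2)).map (fun p => p.1)
  if quotes.length < 2 then "Enum values:\n"
  else
    -- quotes[1] on a list known to have ≥ 2 elements
    let names := ((PySem.List.slice region (some ((quotes.drop 1).headD 0 + 1))).filter
        (fun s => !(s == "") && !(PySem.Str.isIn "\"\"\"" s))).map pvName
    "Enum values:\n" ++ PySem.Str.join "" (names.map (fun n => "\n- `" ++ n ++ "`"))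

-- ===== PRECONDITION & SPEC =====
-- Pre_ excludes exactly the inputs where Python A raises IndexError (start_index + 1 below -len(lines),
-- so the first negative loop index is out of range); B raises there too.
def Pre_get_enum_values (lines : List String) (start_index : Int) : Prop :=
  -1 - (lines.length : Int) ≤ start_index
instance (lines : List String) (start_index : Int) : Decidable (Pre_get_enum_values lines start_index) := by
  unfold Pre_get_enum_values; infer_instance

def pvWitness_get_enum_values : List String × Int :=
  (["class Fruit(Enum):", "    \"\"\"", "    Kinds of fruit.", "    \"\"\"", "", "    apple = 1", "    pear = 2"], 0)

def Spec_get_enum_values (lines : List String) (start_index : Int) (out : String) : Prop := out = get_enum_values_alt lines start_index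
instance (lines : List String) (start_index : Int) (out : String) : Decidable (Spec_get_enum_values lines start_index out) := by unfold Spec_get_enum_values; infer_instance

-- ===== CLAIM (what is proved, stated in full; the proofs are below) =====
def Claim_equal_get_enum_values : Prop := ∀ (lines : List String) (start_index : Int), Dom_get_enum_values lines start_index → Pre_get_enum_values lines start_index → Spec_get_enum_values lines start_index (get_enum_values lines start_index)

-- ===== LEMMAS AND PROOFS =====

def pvQP (s : String) : Bool := PySem.Str.isIn "\"\"\"" s
def pvFP (s : String) : Bool := !(s == "") && !(PySem.Str.isIn "\"\"\"" s)
def pvWrap (n : String) : String := "\n- `" ++ n ++ "`"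
def pvJoin (xs : List String) : String := PySem.Str.join "" ((xs.map pvName).map pvWrap)
def pvQuotes (t : List String) (s : Int) : List Int :=
  ((PySem.List.enumerate t s).filter (fun p => PySem.Str.isIn "\"\"\"" p.2)).map (fun p => p.1)

-- the three docstring phases of A's scan, on the truncated region
def pvPh2 : List String → String
  | [] => ""
  | s :: t => if s = "" then pvPh2 t else if pvQP s then pvPh2 t else pvWrap (pvName s) ++ pvPh2 t
def pvPh1 : List String → String
  | [] => ""
  | s :: t => if s = "" then pvPh1 t else if pvQP s then pvPh2 t else pvPh1 t
def pvPh0 : List String → String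
  | [] => ""
  | s :: t => if s = "" then pvPh0 t else if pvQP s then pvPh1 t else pvPh0 t

theorem pvQP_ne_empty {s : String} (h : pvQP s = true) : ¬ s = "" := by
  intro he; subst he; exact absurd h (by decide)

theorem pvJoin_nil : pvJoin [] = "" := by decide

theorem pv_str_join_empty_cons (x : String) (xs : List String) :
    PySem.Str.join "" (x :: xs) = x ++ PySem.Str.join "" xs := by
  cases xs with
  | nil =>
    show PySem.Str.join "" [x] = x ++ PySem.Str.join "" []
    simp [PySem.Str.join, PySem.Chars.join, List.intercalate]
  | cons y t =>
    show PySem.Str.join "" (x :: y :: t) = x ++ PySem.Str.join "" (y :: t)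
    simp [PySem.Str.join, PySem.Chars.join_cons_cons]

theorem pvJoin_cons (x : String) (xs : List String) :
    pvJoin (x :: xs) = pvWrap (pvName x) ++ pvJoin xs := by
  simp [pvJoin, pv_str_join_empty_cons]

theorem pvPh2_eq_join (t : List String) : pvPh2 t = pvJoin (t.filter pvFP) := by
  induction t with
  | nil => simp [pvPh2, pvJoin_nil]
  | cons s u ih =>
    by_cases he : s = ""
    · subst he
      simp [pvPh2, pvFP, ih]
    · by_cases hq : pvQP s = true
      · have : pvFP s = false := by simp [pvFP, pvQP] at *; intro h; exact hq
        simp [pvPh2, he, hq, this, ih]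
      · have hf : pvFP s = true := by
          simp [pvFP, pvQP] at *; exact ⟨he, hq⟩
        simp [pvPh2, he, hq, hf, pvJoin_cons, ih]

theorem pvQuotes_nil (s : Int) : pvQuotes [] s = [] := rfl

theorem pvQuotes_cons (x : String) (u : List String) (s : Int) :
    pvQuotes (x :: u) s =
      if pvQP x then s :: pvQuotes u (s + 1) else pvQuotes u (s + 1) := by
  unfold pvQuotes
  rw [PySem.List.enumerate_cons, List.filter_cons]
  by_cases h : pvQP x = true
  · rw [if_pos (show PySem.Str.isIn "\"\"\"" (s, x).2 = true from h), if_pos h, List.map_cons]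
  · rw [if_neg (show ¬ PySem.Str.isIn "\"\"\"" (s, x).2 = true from h), if_neg h]

theorem pvQuotes_le {t : List String} {s k : Int} (h : k ∈ pvQuotes t s) : s ≤ k := by
  induction t generalizing s with
  | nil => simp [pvQuotes_nil] at h
  | cons x u ih =>
    rw [pvQuotes_cons] at h
    by_cases hq : pvQP x = true
    · simp [hq] at h
      rcases h with h | h
      · omega
      · have := ih h; omega
    · simp [hq] at h
      have := ih h; omega

-- one docstring delimiter already seen: the region's first further delimiter starts the values
theorem pvG1 (t : List String) (s : Int) (hs : 0 ≤ s) :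
    (pvQuotes t s = [] → pvPh1 t = "") ∧
    (∀ k rest, pvQuotes t s = k :: rest →
      pvPh1 t = pvJoin ((t.drop (k + 1 - s).toNat).filter pvFP)) := by
  induction t generalizing s with
  | nil =>
    refine ⟨fun _ => rfl, fun k rest h => ?_⟩
    simp [pvQuotes_nil] at h
  | cons x u ih =>
    have ihu := ih (s + 1) (by omega)
    by_cases hq : pvQP x = true
    · have hne := pvQP_ne_empty hq
      constructor
      · intro h; rw [pvQuotes_cons] at h; simp [hq] at h
      · intro k rest h
        rw [pvQuotes_cons] at h; simp [hq] at h
        obtain ⟨hk, _⟩ := h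
        have h1 : (k + 1 - s).toNat = 1 := by omega
        simp [pvPh1, hne, hq, h1, pvPh2_eq_join]
    · have hrec : pvPh1 (x :: u) = pvPh1 u := by
        by_cases he : x = ""
        · subst he; simp [pvPh1]
        · simp [pvPh1, he, hq]
      have hqs : pvQuotes (x :: u) s = pvQuotes u (s + 1) := by
        rw [pvQuotes_cons]; simp [hq]
      constructor
      · intro h; rw [hqs] at h; rw [hrec]; exact ihu.1 h
      · intro k rest h
        rw [hqs] at h
        have hk : s + 1 ≤ k := pvQuotes_le (by rw [h]; exact List.mem_cons_self)
        have hd : (x :: u).drop (k + 1 - s).toNat = u.drop (k + 1 - (s + 1)).toNat := by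
          have h2 : (k + 1 - s).toNat = (k + 1 - (s + 1)).toNat + 1 := by omega
          rw [h2]; rfl
        rw [hrec, hd]; exact ihu.2 k rest h

-- no delimiter seen yet: the values start after the SECOND delimiter of the region
theorem pvG0 (t : List String) (s : Int) (hs : 0 ≤ s) :
    ((pvQuotes t s).length < 2 → pvPh0 t = "") ∧
    (∀ k0 k1 rest, pvQuotes t s = k0 :: k1 :: rest →
      pvPh0 t = pvJoin ((t.drop (k1 + 1 - s).toNat).filter pvFP)) := by
  induction t generalizing s with
  | nil =>
    refine ⟨fun _ => rfl, fun k0 k1 rest h => ?_⟩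
    simp [pvQuotes_nil] at h
  | cons x u ih =>
    have ihu := ih (s + 1) (by omega)
    have g1u := pvG1 u (s + 1) (by omega)
    by_cases hq : pvQP x = true
    · have hne := pvQP_ne_empty hq
      have hqs : pvQuotes (x :: u) s = s :: pvQuotes u (s + 1) := by
        rw [pvQuotes_cons]; simp [hq]
      have h0 : pvPh0 (x :: u) = pvPh1 u := by simp [pvPh0, hne, hq]
      constructor
      · intro h
        rw [hqs] at h
        have hnil : pvQuotes u (s + 1) = [] := by
          rw [List.length_cons] at h
          exact List.eq_nil_of_length_eq_zero (by omega)
        rw [h0]; exact g1u.1 hnil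
      · intro k0 k1 rest h
        rw [hqs] at h
        have h2 : pvQuotes u (s + 1) = k1 :: rest := by
          exact congrArg List.tail h
        have hk1 : s + 1 ≤ k1 := pvQuotes_le (by rw [h2]; exact List.mem_cons_self)
        have hd : (x :: u).drop (k1 + 1 - s).toNat = u.drop (k1 + 1 - (s + 1)).toNat := by
          have he : (k1 + 1 - s).toNat = (k1 + 1 - (s + 1)).toNat + 1 := by omega
          rw [he]; rfl
        rw [h0, hd]; exact g1u.2 k1 rest h2
    · have hrec : pvPh0 (x :: u) = pvPh0 u := by
        by_cases he : x = ""
        · subst he; simp [pvPh0]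
        · simp [pvPh0, he, hq]
      have hqs : pvQuotes (x :: u) s = pvQuotes u (s + 1) := by
        rw [pvQuotes_cons]; simp [hq]
      constructor
      · intro h; rw [hqs] at h; rw [hrec]; exact ihu.1 h
      · intro k0 k1 rest h
        rw [hqs] at h
        have hk1 : s + 1 ≤ k1 := pvQuotes_le (by rw [h]; exact List.mem_cons.mpr (.inr List.mem_cons_self))
        have hd : (x :: u).drop (k1 + 1 - s).toNat = u.drop (k1 + 1 - (s + 1)).toNat := by
          have he : (k1 + 1 - s).toNat = (k1 + 1 - (s + 1)).toNat + 1 := by omega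
          rw [he]; rfl
        rw [hrec, hd]; exact ihu.2 k0 k1 rest h

-- A's loop computed by phases over the truncated region
theorem pvLoopA_phases (lines : List String) (idxs : List Int) :
    ∀ (acc : String) (began ended : Bool),
      pvLoopA lines idxs acc began ended =
        acc ++ (if ended then pvPh2 (pvRegionB lines idxs)
                else if began then pvPh1 (pvRegionB lines idxs)
                else pvPh0 (pvRegionB lines idxs)) := by
  induction idxs with
  | nil =>
    intro acc began ended
    cases began <;> cases ended <;> simp [pvLoopA, pvRegionB, pvPh0, pvPh1, pvPh2]
  | cons i rest ih =>
    intro acc began ended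
    cases hg : PySem.List.pyGet? lines i with
    | none =>
      cases began <;> cases ended <;>
        simp [pvLoopA, pvRegionB, hg, pvPh0, pvPh1, pvPh2]
    | some s =>
      by_cases hc : PySem.Str.isIn "class " s = true
      · simp at hc
        cases began <;> cases ended <;>
          simp [pvLoopA, pvRegionB, hg, hc, pvPh0, pvPh1, pvPh2]
      · simp at hc
        by_cases he : s = ""
        · subst he
          simp at hc
          cases began <;> cases ended <;>
            simp [pvLoopA, pvRegionB, hg, hc, pvPh0, pvPh1, pvPh2, pvQP, ih]
        · by_cases hq : PySem.Str.isIn "\"\"\"" s = true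
          · simp at hq
            cases began <;> cases ended <;>
              simp [pvLoopA, pvRegionB, hg, hc, he, hq, pvPh0, pvPh1, pvPh2, pvQP, ih]
          · simp at hq
            cases began <;> cases ended <;>
              simp [pvLoopA, pvRegionB, hg, hc, he, hq, pvPh0, pvPh1, pvPh2, pvQP, ih,
                    pvWrap, String.append_assoc]

theorem pvA_eq (lines : List String) (start_index : Int) :
    get_enum_values lines start_index =
      "Enum values:\n" ++ pvPh0 (pvRegionB lines (PySem.List.pyRange (start_index + 1) (lines.length : Int))) := by
  rw [get_enum_values, pvLoopA_phases]
  simp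

theorem pvB_eq (lines : List String) (start_index : Int) :
    get_enum_values_alt lines start_index =
      "Enum values:\n" ++ pvPh0 (pvRegionB lines (PySem.List.pyRange (start_index + 1) (lines.length : Int))) := by
  rw [get_enum_values_alt]
  set region := pvRegionB lines (PySem.List.pyRange (start_index + 1) (lines.length : Int)) with hreg
  have hq : ((PySem.List.enumerate region).filter (fun p => PySem.Str.isIn "\"\"\"" p.2)).map (fun p => p.1)
      = pvQuotes region 0 := rfl
  rw [hq]
  by_cases hlen : (pvQuotes region 0).length < 2
  · rw [if_pos hlen, (pvG0 region 0 (by omega)).1 hlen, String.append_empty]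
  · rw [if_neg hlen]
    cases hqq : pvQuotes region 0 with
    | nil => rw [hqq] at hlen; simp at hlen
    | cons k0 tl =>
      cases tl with
      | nil => rw [hqq] at hlen; simp at hlen
      | cons k1 rest =>
        have hk1 : (0 : Int) ≤ k1 := by
          have := pvQuotes_le (t := region) (s := 0) (k := k1)
            (by rw [hqq]; exact List.mem_cons.mpr (.inr List.mem_cons_self))
          omega
        have hhead : ((k0 :: k1 :: rest).drop 1).headD 0 = k1 := rfl
        rw [hhead]
        rw [PySem.List.slice_from region (by omega : (0:Int) ≤ k1 + 1)]
        rw [(pvG0 region 0 (by omega)).2 k0 k1 rest hqq]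
        have : (k1 + 1 - 0 : Int).toNat = (k1 + 1).toNat := by omega
        rw [this]
        rfl

-- ===== VERDICT (by name: the statement is the Claim_ definition above) =====
theorem get_enum_values_spec : Claim_equal_get_enum_values := by
  intro lines start_index _ _
  unfold Spec_get_enum_values
  rw [pvA_eq, pvB_eq]
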